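-- pv_equiv track=rewrite | github.com/MatiasCostantini094/Tp-integrador-Matematica-2 | conjuntos.py | calcular_operaciones
-- ===== SOURCE A (Python) =====
-- def calcular_operaciones(conjuntos):
--     if not conjuntos: # Si no hay datos, devolvemos conjuntos vacíos para evitar errores.
--         return set(), set(), [], set()
--
--     # La unión contiene todos los dígitos que aparecen en al menos uno de los DNIs.
--     union = set.union(*conjuntos)
--     # La intersección contiene solo los dígitos que están presentes en *todos* los DNIs.
--     interseccion = set.intersection(*conjuntos)
--
--     diferencias = []
--     # Calculamos la diferencia entre conjuntos consecutivos.
--     for i in range(len(conjuntos) - 1):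
--         diferencias.append(conjuntos[i] - conjuntos[i+1])
--
--     # La diferencia simétrica muestra los dígitos que están en un conjunto o en otro, pero no en ambos.
--     # Es como el 'O exclusivo'.
--     diferencia_simetrica = conjuntos[0]
--     for conjunto in conjuntos[1:]:
--         diferencia_simetrica = diferencia_simetrica.symmetric_difference(conjunto)
--
--     return union, interseccion, diferencias, diferencia_simetrica
-- ===== SOURCE B (Python) =====
-- def calcular_operaciones(conjuntos):
--     if not conjuntos:
--         return set(), set(), [], set()
--
--     # One counting pass: for each element, in how many of the sets it appears.
--     conteo = {}
--     for c in conjuntos: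
--         for x in c:
--             conteo[x] = conteo.get(x, 0) + 1
--
--     n = len(conjuntos)
--     union = set(conteo)
--     interseccion = {x for x, k in conteo.items() if k == n}
--     diferencias = [a - b for a, b in zip(conjuntos, conjuntos[1:])]
--
--     diferencia_simetrica = conjuntos[0]
--     for c in conjuntos[1:]:
--         diferencia_simetrica = diferencia_simetrica ^ c
--     return union, interseccion, diferencias, diferencia_simetrica
-- ===== Notes on version B (the rewrite author's own statement) =====
-- stated objective: alternative
-- what changed: Union and intersection are derived from a single counting pass (dict element -> number of sets containing it) instead of set.union(*)/set.intersection(*), and the consecutive differences come from a zip comprehension instead of an index loop.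
import Mathlib
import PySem

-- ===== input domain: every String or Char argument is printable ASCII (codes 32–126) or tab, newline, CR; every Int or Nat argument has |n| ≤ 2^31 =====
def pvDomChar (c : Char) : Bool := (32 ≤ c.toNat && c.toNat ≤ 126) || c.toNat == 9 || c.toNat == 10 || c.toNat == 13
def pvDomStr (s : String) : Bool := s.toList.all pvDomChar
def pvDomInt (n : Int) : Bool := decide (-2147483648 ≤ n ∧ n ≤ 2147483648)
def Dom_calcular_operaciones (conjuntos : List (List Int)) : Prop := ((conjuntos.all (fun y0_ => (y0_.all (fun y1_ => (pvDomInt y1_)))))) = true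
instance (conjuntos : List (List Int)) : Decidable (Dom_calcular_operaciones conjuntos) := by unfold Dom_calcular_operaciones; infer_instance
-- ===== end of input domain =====

-- B derives union and intersection from one membership-counting pass over all the sets and the
-- consecutive differences from a zip, instead of A's set.union(*)/set.intersection(*) and index loop.

-- ===== PORT A =====
def calcular_operaciones (conjuntos : List (List Int)) : List Int × List Int × List (List Int) × List Int :=
  match conjuntos with
  | [] => ([], [], [], [])
  | c0 :: rest =>
    -- union = set.union(*conjuntos), interseccion = set.intersection(*conjuntos)
    let union := rest.foldl (fun s t => PySem.Set.union s t) c0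
    let interseccion := rest.foldl (fun s t => PySem.Set.inter s t) c0
    -- for i in range(len(conjuntos)-1): diferencias.append(conjuntos[i] - conjuntos[i+1])
    let diferencias := (PySem.List.pyRange 0 (PySem.List.len conjuntos - 1) 1).foldl
      (fun acc i => acc ++ [PySem.Set.diff (PySem.List.pyGetD conjuntos i []) (PySem.List.pyGetD conjuntos (i + 1) [])]) []
    -- diferencia_simetrica = conjuntos[0]; for c in conjuntos[1:]: ds = ds.symmetric_difference(c)
    let ds := rest.foldl (fun s t => PySem.Set.symmDiff s t) c0
    (union, interseccion, diferencias, ds)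

-- ===== PORT B =====
def calcular_operaciones_alt (conjuntos : List (List Int)) : List Int × List Int × List (List Int) × List Int :=
  match conjuntos with
  | [] => ([], [], [], [])
  | c0 :: rest =>
    -- conteo = {}; for c in conjuntos: for x in c: conteo[x] = conteo.get(x, 0) + 1
    let conteo := conjuntos.foldl
      (fun d c => c.foldl (fun (d : PySem.Dict Int Int) x => d.modify x 0 (· + 1)) d) PySem.Dict.empty
    let n := PySem.List.len conjuntos
    -- union = set(conteo)
    let union := PySem.Set.ofList conteo.keys
    -- interseccion = {x for x, k in conteo.items() if k == n}
    let interseccion := PySem.Set.ofList ((conteo.items.filter (fun p => p.2 == n)).map Prod.fst)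
    -- diferencias = [a - b for a, b in zip(conjuntos, conjuntos[1:])]
    let diferencias := (conjuntos.zip rest).map (fun p => PySem.Set.diff p.1 p.2)
    -- diferencia_simetrica = conjuntos[0]; for c in conjuntos[1:]: ds = ds ^ c
    let ds := rest.foldl (fun s t => PySem.Set.symmDiff s t) c0
    (union, interseccion, diferencias, ds)

-- ===== PRECONDITION & SPEC =====
-- The arguments model Python sets: each inner list holds distinct elements.
def Pre_calcular_operaciones (conjuntos : List (List Int)) : Prop := ∀ c ∈ conjuntos, c.Nodup
instance (conjuntos : List (List Int)) : Decidable (Pre_calcular_operaciones conjuntos) := by unfold Pre_calcular_operaciones; infer_instance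
def pvWitness_calcular_operaciones : List (List Int) := [[1, 2], [2, 3]]

def Spec_calcular_operaciones (conjuntos : List (List Int)) (out : List Int × List Int × List (List Int) × List Int) : Prop := out = calcular_operaciones_alt conjuntos
instance (conjuntos : List (List Int)) (out : List Int × List Int × List (List Int) × List Int) : Decidable (Spec_calcular_operaciones conjuntos out) := by unfold Spec_calcular_operaciones; infer_instance

-- ===== CLAIM (what is proved, stated in full; the proofs are below) =====
def Claim_equal_calcular_operaciones : Prop := ∀ (conjuntos : List (List Int)), Dom_calcular_operaciones conjuntos → Pre_calcular_operaciones conjuntos → Spec_calcular_operaciones conjuntos (calcular_operaciones conjuntos)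

-- ===== LEMMAS AND PROOFS =====

theorem conteo_eq (conjuntos : List (List Int)) :
    conjuntos.foldl (fun d c => c.foldl (fun (d : PySem.Dict Int Int) x => d.modify x 0 (· + 1)) d) PySem.Dict.empty
      = PySem.Dict.counter conjuntos.flatten := by
  rw [PySem.Dict.counter_eq_foldl, List.foldl_flatten]

theorem foldl_union (c0 : List Int) (rest : List (List Int)) :
    rest.foldl (fun s t => PySem.Set.union s t) c0 = PySem.Set.update c0 rest.flatten := by
  induction rest generalizing c0 with
  | nil => exact (PySem.Set.update_nil c0).symm
  | cons t ts ih =>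
    rw [List.foldl_cons, ih, List.flatten_cons, PySem.Set.update_append]
    rfl

theorem foldl_inter (s : List Int) (rest : List (List Int)) :
    rest.foldl (fun s t => PySem.Set.inter s t) s
      = s.filter (fun x => rest.all (fun t => PySem.Set.contains t x)) := by
  induction rest generalizing s with
  | nil => simp
  | cons t ts ih =>
    rw [List.foldl_cons, ih]
    show (s.filter (fun x => PySem.Set.contains t x)).filter _ = _
    rw [List.filter_filter]
    apply List.filter_congr
    intro x _
    simp [List.all_cons, Bool.and_comm]

theorem count_flatten_le (x : Int) (rest : List (List Int)) (h : ∀ c ∈ rest, List.Nodup c) :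
    List.count x rest.flatten ≤ rest.length := by
  induction rest with
  | nil => simp
  | cons t ts ih =>
    have ht : List.count x t ≤ 1 := List.nodup_iff_count_le_one.mp (h t (by simp)) x
    have hts := ih (fun c hc => h c (by simp [hc]))
    simp only [List.flatten_cons, List.count_append, List.length_cons]
    omega

theorem all_contains_iff_count (x : Int) (rest : List (List Int)) (h : ∀ c ∈ rest, List.Nodup c) :
    (rest.all (fun t => PySem.Set.contains t x) = true) ↔ List.count x rest.flatten = rest.length := by
  induction rest with
  | nil => simp
  | cons t ts ih =>
    have ht : List.count x t ≤ 1 := List.nodup_iff_count_le_one.mp (h t (by simp)) x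
    have hle := count_flatten_le x ts (fun c hc => h c (by simp [hc]))
    have hpos : (PySem.Set.contains t x = true) ↔ 0 < List.count x t := by
      rw [PySem.Set.contains_iff]
      exact List.count_pos_iff.symm
    rw [List.all_cons, Bool.and_eq_true, hpos, ih (fun c hc => h c (by simp [hc]))]
    simp only [List.flatten_cons, List.count_append, List.length_cons]
    omega

theorem inter_lemma (c0 : List Int) (rest : List (List Int)) (h0 : c0.Nodup)
    (h : ∀ c ∈ rest, List.Nodup c) :
    rest.foldl (fun s t => PySem.Set.inter s t) c0 =
      PySem.Set.ofList (((PySem.Dict.counter (c0 :: rest).flatten).items.filter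
        (fun p => p.2 == PySem.List.len (c0 :: rest))).map Prod.fst) := by
  rw [PySem.Dict.items_counter, List.filter_map, List.map_map]
  have hid : (Prod.fst ∘ fun k => (k, ((List.count k ((c0 :: rest).flatten) : Int)))) = fun (k : Int) => k := rfl
  rw [hid, List.map_id']
  rw [foldl_inter]
  have hsplit : PySem.Set.ofList ((c0 :: rest).flatten)
      = c0 ++ List.filter (fun y => !PySem.Set.contains c0 y) (PySem.Set.ofList rest.flatten) := by
    rw [List.flatten_cons, PySem.Set.ofList_append, PySem.Set.ofList_eq_self_of_nodup _ h0,
        PySem.Set.update_eq_append_filter]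
  rw [hsplit, List.filter_append]
  have hextra : List.filter ((fun p => p.2 == PySem.List.len (c0 :: rest)) ∘
      fun k => (k, ((List.count k ((c0 :: rest).flatten) : Int))))
      (List.filter (fun y => !PySem.Set.contains c0 y) (PySem.Set.ofList rest.flatten)) = [] := by
    rw [List.filter_eq_nil_iff]
    intro y hy
    obtain ⟨hy1, hy2⟩ := List.mem_filter.mp hy
    have hnc : y ∉ c0 := by
      intro hc
      have hcon := (PySem.Set.contains_iff c0 y).mpr hc
      rw [hcon] at hy2
      simp at hy2
    have h1 : List.count y c0 = 0 := List.count_eq_zero.mpr hnc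
    have h2 : List.count y rest.flatten ≤ rest.length := count_flatten_le y rest h
    simp only [Function.comp_apply, PySem.List.len_eq, beq_iff_eq, List.flatten_cons,
      List.count_append, List.length_cons]
    intro he
    have : List.count y c0 + List.count y rest.flatten = rest.length + 1 := by exact_mod_cast he
    omega
  rw [hextra, List.append_nil]
  have hnd : (List.filter ((fun (p : Int × Int) => p.2 == PySem.List.len (c0 :: rest)) ∘
      fun k => (k, ((List.count k ((c0 :: rest).flatten) : Int)))) c0).Nodup := h0.filter _
  rw [PySem.Set.ofList_eq_self_of_nodup _ hnd]
  apply List.filter_congr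
  intro x hx
  have h1 : List.count x c0 = 1 := List.count_eq_one_of_mem h0 hx
  have hle := count_flatten_le x rest h
  have hiff := all_contains_iff_count x rest h
  have hcnt : List.count x ((c0 :: rest).flatten) = 1 + List.count x rest.flatten := by
    rw [List.flatten_cons, List.count_append, h1]
  rw [Bool.eq_iff_iff]
  simp only [Function.comp_apply, PySem.List.len_eq, beq_iff_eq]
  rw [hiff, hcnt, List.length_cons]
  omega

theorem dif_lemma (c0 : List Int) (rest : List (List Int)) :
    (PySem.List.pyRange 0 (PySem.List.len (c0 :: rest) - 1) 1).foldl
      (fun acc i => acc ++ [PySem.Set.diff (PySem.List.pyGetD (c0 :: rest) i [])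
        (PySem.List.pyGetD (c0 :: rest) (i + 1) [])]) [] =
    ((c0 :: rest).zip rest).map (fun p => PySem.Set.diff p.1 p.2) := by
  have hlen : PySem.List.len (c0 :: rest) - 1 = ((rest.length : Nat) : Int) := by
    rw [PySem.List.len_eq]
    push_cast [List.length_cons]
    ring
  rw [hlen, PySem.List.pyRange_zero_natCast,
    PySem.List.foldl_append_singleton_eq_map
      (fun i => PySem.Set.diff (PySem.List.pyGetD (c0 :: rest) i []) (PySem.List.pyGetD (c0 :: rest) (i + 1) [])),
    List.nil_append, List.map_map]
  apply List.ext_getElem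
  · simp [List.length_zip]
  · intro i h1 h2
    have hi : i < rest.length := by simpa using h1
    simp only [List.getElem_map, List.getElem_range, List.getElem_zip, Function.comp_apply]
    rw [PySem.List.pyGetD_natCast]
    have hc : ((i : Int) + 1) = ((i + 1 : Nat) : Int) := by push_cast; ring
    rw [hc, PySem.List.pyGetD_natCast]
    rw [List.getD_eq_getElem _ _ (by simp; omega), List.getD_eq_getElem _ _ (by simp; omega)]
    simp [List.getElem_cons_succ]

-- ===== VERDICT (by name: the statement is the Claim_ definition above) =====
theorem calcular_operaciones_spec : Claim_equal_calcular_operaciones := by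
  intro conjuntos _ hpre
  unfold Spec_calcular_operaciones
  match conjuntos with
  | [] => rfl
  | c0 :: rest =>
    have h0 : c0.Nodup := hpre c0 (by simp)
    have h : ∀ c ∈ rest, List.Nodup c := fun c hc => hpre c (by simp [hc])
    simp only [calcular_operaciones, calcular_operaciones_alt, conteo_eq]
    refine Prod.ext ?_ (Prod.ext ?_ (Prod.ext ?_ rfl))
    · rw [foldl_union, PySem.Dict.keys_counter, PySem.Set.ofList_ofList, List.flatten_cons,
          PySem.Set.ofList_append, PySem.Set.ofList_eq_self_of_nodup _ h0]
    · exact inter_lemma c0 rest h0 h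
    · exact dif_lemma c0 rest
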